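-- pv_equiv track=rewrite | github.com/sjhatfield/adventofcode2020 | day21.py | find_possible_allergens
-- ===== SOURCE A (Python) =====
-- def find_possible_allergens(food, ingredients, allergens) -> dict:
--     poss = {}
--     allergen_frees = []
--     for ingreds, allergs in food:
--         for allerg in allergs:
--             if allerg not in poss:
--                 poss[allerg] = set(ingreds.copy())
--             else:
--                 poss[allerg] &= set(ingreds)
--     return poss
-- ===== SOURCE B (Python) =====
-- def find_possible_allergens(food, ingredients, allergens) -> dict:
--     # Allergen-major: list allergens in first-seen order, then for each allergen keep
--     # exactly the ingredients of its first listing that occur in every food listing it.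
--     order = []
--     for _, allergs in food:
--         for a in allergs:
--             if a not in order:
--                 order.append(a)
--     result = {}
--     for a in order:
--         listings = [ingreds for ingreds, allergs in food if a in allergs]
--         result[a] = {i for i in listings[0] if all(i in l for l in listings[1:])}
--     return result
-- ===== Notes on version B (the rewrite author's own statement) =====
-- stated objective: alternative
-- what changed: Replaces A's single-pass dict fold that seeds-or-intersects a running set per allergen with an allergen-major algorithm: compute the first-seen allergen order, then for each allergen filter the ingredients of its first listing by membership in every other food listing it (no running intersection state).
import Mathlib
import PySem

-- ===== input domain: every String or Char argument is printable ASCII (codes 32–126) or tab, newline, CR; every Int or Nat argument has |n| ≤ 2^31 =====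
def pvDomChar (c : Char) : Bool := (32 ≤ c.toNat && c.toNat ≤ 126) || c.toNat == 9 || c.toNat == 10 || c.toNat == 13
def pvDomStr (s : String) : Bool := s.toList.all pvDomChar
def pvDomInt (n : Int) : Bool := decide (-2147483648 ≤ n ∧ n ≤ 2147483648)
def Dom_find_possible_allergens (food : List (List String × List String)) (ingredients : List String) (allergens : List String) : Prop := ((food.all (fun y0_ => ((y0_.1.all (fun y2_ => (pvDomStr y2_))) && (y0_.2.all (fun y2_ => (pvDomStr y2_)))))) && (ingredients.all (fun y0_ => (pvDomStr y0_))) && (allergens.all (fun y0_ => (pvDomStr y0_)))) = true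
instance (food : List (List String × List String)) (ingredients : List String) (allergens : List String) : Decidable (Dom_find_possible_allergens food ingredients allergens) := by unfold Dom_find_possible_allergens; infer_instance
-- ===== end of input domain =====

-- B replaces A's single-pass seed-or-intersect dict fold by an allergen-major algorithm: first-seen allergen order, then per allergen a membership filter of its first listing against all its listings (same asymptotic cost).


-- ===== PORT A =====
-- A: one dict `poss`; for each (ingreds, allergs) and each allergen, seed with set(ingreds) or intersect in place.
-- (A's local `allergen_frees = []` is dead code and not ported.)
def find_possible_allergens (food : List (List String × List String)) (ingredients : List String) (allergens : List String) : List (String × List String) :=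
  (food.foldl (fun poss p =>
      p.2.foldl (fun (poss : PySem.Dict String (List String)) allerg =>
          if poss.contains allerg = false then
            poss.insert allerg (PySem.Set.ofList p.1)
          else
            poss.insert allerg (PySem.Set.inter (poss.getD allerg []) (PySem.Set.ofList p.1)))
        poss)
    PySem.Dict.empty).items

-- ===== PORT B =====
-- B: allergen-major.  Pass 1 collects the allergens in first-seen order; pass 2 maps each allergen to
-- the set comprehension {i for i in listings[0] if all(i in l for l in listings[1:])} where listings are
-- the ingredient lists of the foods listing it.  The result dict's keys are exactly `order` (distinct,
-- inserted fresh in this order), so its items are this map.  `listings[0]`/`listings[1:]` are ported as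
-- headD []/drop 1: listings is nonempty for every allergen of `order`, so the [0]-index never raises.
def find_possible_allergens_alt (food : List (List String × List String)) (ingredients : List String) (allergens : List String) : List (String × List String) :=
  let order := food.foldl (fun (ord : List String) p =>
      p.2.foldl (fun (ord : List String) a => if ord.contains a then ord else ord ++ [a]) ord) []
  order.map (fun a =>
    let listings := (food.filter (fun p => p.2.contains a)).map (fun p => p.1)
    (a, PySem.Set.ofList ((listings.headD []).filter
          (fun i => (listings.drop 1).all (fun l => l.contains i)))))

-- ===== PRECONDITION & SPEC =====
def Spec_find_possible_allergens (food : List (List String × List String)) (ingredients : List String) (allergens : List String) (out : List (String × List String)) : Prop := out = find_possible_allergens_alt food ingredients allergens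
instance (food : List (List String × List String)) (ingredients : List String) (allergens : List String) (out : List (String × List String)) : Decidable (Spec_find_possible_allergens food ingredients allergens out) := by unfold Spec_find_possible_allergens; infer_instance

-- ===== CLAIM (what is proved, stated in full; the proofs are below) =====
def Claim_equal_find_possible_allergens : Prop := ∀ (food : List (List String × List String)) (ingredients : List String) (allergens : List String), Dom_find_possible_allergens food ingredients allergens → Spec_find_possible_allergens food ingredients allergens (find_possible_allergens food ingredients allergens)

-- ===== LEMMAS AND PROOFS =====

-- A's per-food dict step (definitionally the inner loop of port A)
def pvAstep (d : PySem.Dict String (List String)) (p : List String × List String) : PySem.Dict String (List String) :=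
  p.2.foldl (fun (poss : PySem.Dict String (List String)) allerg =>
      if poss.contains allerg = false then
        poss.insert allerg (PySem.Set.ofList p.1)
      else
        poss.insert allerg (PySem.Set.inter (poss.getD allerg []) (PySem.Set.ofList p.1)))
    d

-- B's order accumulation (definitionally the first pass of port B)
def pvOrdStep (ord : List String) (asl : List String) : List String :=
  asl.foldl (fun (ord : List String) a => if ord.contains a then ord else ord ++ [a]) ord

def pvOrd (fs : List (List String × List String)) : List String :=
  fs.foldl (fun ord p => pvOrdStep ord p.2) []

-- the ingredient lists of the foods listing allergen a
def pvListings (fs : List (List String × List String)) (a : String) : List (List String) :=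
  (fs.filter (fun p => p.2.contains a)).map (fun p => p.1)

-- A's intersection value of a group of sets
def pvRed (sets : List (List String)) : List String :=
  match sets with
  | [] => []
  | s :: rest => rest.foldl PySem.Set.inter s

def pvAval (fs : List (List String × List String)) (a : String) : List String :=
  pvRed ((pvListings fs a).map (fun l => PySem.Set.ofList l))

def pvBval (fs : List (List String × List String)) (a : String) : List String :=
  PySem.Set.ofList (((pvListings fs a).headD []).filter
    (fun i => ((pvListings fs a).drop 1).all (fun l => l.contains i)))

-- value attached to key x while food p is being merged after prefix `done` of p.2
def pvVal (fs : List (List String × List String)) (p : List String × List String)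
    (done : List String) (x : String) : List String :=
  if done.contains x then pvAval (fs ++ [p]) x else pvAval fs x

theorem pv_mem_ordStep (ord asl : List String) (x : String) :
    x ∈ pvOrdStep ord asl ↔ x ∈ ord ∨ x ∈ asl := by
  induction asl generalizing ord with
  | nil => simp [pvOrdStep]
  | cons a rest ih =>
    show x ∈ pvOrdStep (if ord.contains a then ord else ord ++ [a]) rest ↔ _
    rw [ih]
    by_cases h : a ∈ ord
    · simp only [List.contains_iff_mem.mpr h, if_true, List.mem_cons]
      constructor
      · rintro (h1 | h1)
        · exact Or.inl h1
        · exact Or.inr (Or.inr h1)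
      · rintro (h1 | h1 | h1)
        · exact Or.inl h1
        · exact Or.inl (h1 ▸ h)
        · exact Or.inr h1
    · have hc : ord.contains a = false := by simp [List.contains_eq_mem, h]
      simp only [hc, Bool.false_eq_true, if_false, List.mem_append, List.mem_cons]
      tauto

theorem pv_ordStep_snoc (ord done : List String) (a : String) :
    pvOrdStep ord (done ++ [a]) =
      (if (pvOrdStep ord done).contains a then pvOrdStep ord done else pvOrdStep ord done ++ [a]) := by
  simp [pvOrdStep, List.foldl_append]

theorem pv_ord_snoc (fs : List (List String × List String)) (p : List String × List String) :
    pvOrd (fs ++ [p]) = pvOrdStep (pvOrd fs) p.2 := by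
  simp [pvOrd, List.foldl_append]

theorem pv_mem_ord (fs : List (List String × List String)) (x : String) :
    x ∈ pvOrd fs ↔ ∃ p ∈ fs, x ∈ p.2 := by
  induction fs using List.reverseRecOn with
  | nil => simp [pvOrd]
  | append_singleton fs p ih =>
    rw [pv_ord_snoc, pv_mem_ordStep, ih]
    constructor
    · rintro (⟨q, hq, hx⟩ | hx)
      · exact ⟨q, by simp [hq], hx⟩
      · exact ⟨p, by simp, hx⟩
    · rintro ⟨q, hq, hx⟩
      rcases List.mem_append.mp hq with h | h
      · exact Or.inl ⟨q, h, hx⟩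
      · rw [List.mem_singleton] at h
        exact Or.inr (h ▸ hx)

theorem pv_listings_snoc (fs : List (List String × List String)) (p : List String × List String) (a : String) :
    pvListings (fs ++ [p]) a = pvListings fs a ++ (if p.2.contains a then [p.1] else []) := by
  by_cases hm : a ∈ p.2 <;>
    simp [pvListings, List.filter_append, List.contains_eq_mem, hm]

theorem pv_listings_nil (fs : List (List String × List String)) (a : String) (h : a ∉ pvOrd fs) :
    pvListings fs a = [] := by
  simp only [pvListings, List.map_eq_nil_iff, List.filter_eq_nil_iff]
  intro q hq hc
  exact h ((pv_mem_ord fs a).mpr ⟨q, hq, List.contains_iff_mem.mp hc⟩)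

theorem pv_listings_ne_nil (fs : List (List String × List String)) (a : String) (h : a ∈ pvOrd fs) :
    pvListings fs a ≠ [] := by
  obtain ⟨p, hp, ha⟩ := (pv_mem_ord fs a).mp h
  have : p.1 ∈ pvListings fs a :=
    List.mem_map.mpr ⟨p, List.mem_filter.mpr ⟨hp, List.contains_iff_mem.mpr ha⟩, rfl⟩
  exact List.ne_nil_of_mem this

theorem pv_aval_not_listed (fs : List (List String × List String)) (p : List String × List String)
    (a : String) (h : p.2.contains a = false) : pvAval (fs ++ [p]) a = pvAval fs a := by
  have hm : a ∉ p.2 := by simpa [List.contains_eq_mem] using h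
  simp [pvAval, pv_listings_snoc, hm]

theorem pv_fold_inter_eq_filter (ts : List (List String)) (x : List String) :
    ts.foldl PySem.Set.inter x = x.filter (fun i => ts.all (fun t => PySem.Set.contains t i)) := by
  induction ts generalizing x with
  | nil => simp
  | cons t ts ih =>
    show ts.foldl PySem.Set.inter (PySem.Set.inter x t) = _
    rw [ih]
    show List.filter _ (List.filter (fun i => PySem.Set.contains t i) x) = _
    rw [List.filter_filter]
    congr 1
    funext i
    simp only [List.all_cons]
    cases PySem.Set.contains t i <;> simp

theorem pv_contains_filter (p : String → Bool) (s : List String) (a : String) (hp : p a = true) :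
    (List.filter p s).contains a = s.contains a := by
  cases hs : s.contains a
  · cases hf : (List.filter p s).contains a
    · rfl
    · have := List.contains_iff_mem.mpr (List.mem_of_mem_filter (List.contains_iff_mem.mp hf))
      rw [hs] at this
      simp at this
  · exact List.contains_iff_mem.mpr (List.mem_filter.mpr ⟨List.contains_iff_mem.mp hs, hp⟩)

theorem pv_filter_foldl_add (p : String → Bool) (l : List String) :
    ∀ s : List String, List.filter p (l.foldl PySem.Set.add s) = (l.filter p).foldl PySem.Set.add (s.filter p) := by
  induction l with
  | nil => intro s; rfl
  | cons a l ih =>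
    intro s
    show List.filter p (l.foldl PySem.Set.add (PySem.Set.add s a)) = _
    by_cases hp : p a = true
    · have h1 : List.filter p (PySem.Set.add s a) = PySem.Set.add (List.filter p s) a := by
        simp only [PySem.Set.add, PySem.Set.contains_eq_listContains, pv_contains_filter p s a hp]
        split_ifs with h
        · rfl
        · simp [List.filter_append, hp]
      rw [ih, h1]
      simp [hp]
    · have hp' : p a = false := by
        cases h : p a
        · rfl
        · exact absurd h hp
      have h1 : List.filter p (PySem.Set.add s a) = List.filter p s := by
        simp only [PySem.Set.add]
        split_ifs with h
        · rfl
        · simp [List.filter_append, hp']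
      rw [ih, h1]
      simp [hp']

theorem pv_filter_ofList (p : String → Bool) (l : List String) :
    List.filter p (PySem.Set.ofList l) = PySem.Set.ofList (l.filter p) := by
  have := pv_filter_foldl_add p l []
  simpa [PySem.Set.ofList, PySem.Set.empty] using this

theorem pv_ofList_contains (l : List String) (i : String) :
    PySem.Set.contains (PySem.Set.ofList l) i = l.contains i := by
  cases h : l.contains i
  · cases h2 : PySem.Set.contains (PySem.Set.ofList l) i
    · rfl
    · have hm := (PySem.Set.mem_ofList l i).mp ((PySem.Set.contains_iff _ i).mp h2)
      have := List.contains_iff_mem.mpr hm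
      rw [h] at this
      simp at this
  · exact (PySem.Set.contains_iff _ i).mpr ((PySem.Set.mem_ofList l i).mpr (List.contains_iff_mem.mp h))

theorem pv_inter_self (t : List String) : PySem.Set.inter t t = t := by
  apply List.filter_eq_self.mpr
  intro a ha
  exact (PySem.Set.contains_iff t a).mpr ha

theorem pv_red_snoc (l : List (List String)) (t : List String) (h : l ≠ []) :
    pvRed (l ++ [t]) = PySem.Set.inter (pvRed l) t := by
  cases l with
  | nil => exact absurd rfl h
  | cons s r => simp [pvRed, List.foldl_append]

theorem pv_red_absorb (l : List (List String)) (t : List String) :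
    PySem.Set.inter (pvRed (l ++ [t])) t = pvRed (l ++ [t]) := by
  cases l with
  | nil => simpa [pvRed] using pv_inter_self t
  | cons s r =>
    show PySem.Set.inter ((r ++ [t]).foldl PySem.Set.inter s) t = (r ++ [t]).foldl PySem.Set.inter s
    rw [pv_fold_inter_eq_filter]
    show List.filter (fun x => PySem.Set.contains t x) _ = _
    rw [List.filter_filter]
    congr 1
    funext i
    simp only [List.all_append, List.all_cons, List.all_nil]
    cases PySem.Set.contains t i <;> simp

theorem pv_aval_eq_bval (fs : List (List String × List String)) (a : String)
    (h : pvListings fs a ≠ []) : pvAval fs a = pvBval fs a := by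
  obtain ⟨s, rest, hl⟩ : ∃ s rest, pvListings fs a = s :: rest := by
    cases hc : pvListings fs a with
    | nil => exact absurd hc h
    | cons s rest => exact ⟨s, rest, rfl⟩
  unfold pvAval pvBval pvRed
  rw [hl]
  simp only [List.map_cons, List.headD_cons, List.drop_one, List.tail_cons]
  rw [pv_fold_inter_eq_filter, pv_filter_ofList]
  congr 2
  funext i
  rw [List.all_map]
  congr 1
  funext l
  exact pv_ofList_contains l i

-- dict characterized by items = ord.map (x, g x)
theorem pv_dict_contains (d : PySem.Dict String (List String)) (ord : List String)
    (g : String → List String) (h : d.items = ord.map (fun x => (x, g x))) (a : String) :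
    d.contains a = ord.contains a := by
  simp only [PySem.Dict.contains, h, List.any_map, Function.comp_def]
  cases hc : ord.contains a
  · have hm : a ∉ ord := by simpa [List.contains_eq_mem] using hc
    simp only [List.any_eq_false]
    intro x hx
    simp only [beq_iff_eq]
    exact fun he => hm (he ▸ hx)
  · have hm : a ∈ ord := List.contains_iff_mem.mp hc
    exact List.any_eq_true.mpr ⟨a, hm, beq_self_eq_true a⟩

theorem pv_dict_getD (d : PySem.Dict String (List String)) (ord : List String)
    (g : String → List String) (h : d.items = ord.map (fun x => (x, g x))) (a : String)
    (ha : a ∈ ord) : d.getD a [] = g a := by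
  simp only [PySem.Dict.getD, PySem.Dict.get?, h, List.find?_map, Function.comp_def]
  have hsome : (ord.find? (fun x => x == a)).isSome = true :=
    List.find?_isSome.mpr ⟨a, ha, beq_self_eq_true a⟩
  obtain ⟨b, hb⟩ := Option.isSome_iff_exists.mp hsome
  have hba : b = a := eq_of_beq (List.find?_eq_some_iff_append.mp hb).1
  rw [hb, hba]
  rfl

-- one allergen step of A inside food p, after processed prefix `done`
theorem pv_step (fs : List (List String × List String)) (p : List String × List String)
    (done : List String) (a : String) (d : PySem.Dict String (List String))
    (ha : a ∈ p.2)
    (h : d.items = (pvOrdStep (pvOrd fs) done).map (fun x => (x, pvVal fs p done x))) :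
    (if d.contains a = false then d.insert a (PySem.Set.ofList p.1)
     else d.insert a (PySem.Set.inter (d.getD a []) (PySem.Set.ofList p.1))).items
      = (pvOrdStep (pvOrd fs) (done ++ [a])).map (fun x => (x, pvVal fs p (done ++ [a]) x)) := by
  have hcont := pv_dict_contains d _ _ h a
  rw [pv_ordStep_snoc]
  cases hc : (pvOrdStep (pvOrd fs) done).contains a
  · -- fresh key overall: seed with set(ingreds)
    have hna : a ∉ pvOrdStep (pvOrd fs) done := by
      simpa [List.contains_eq_mem] using hc
    have hnord : a ∉ pvOrd fs := fun hmem => hna ((pv_mem_ordStep _ _ _).mpr (Or.inl hmem))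
    have hndone : a ∉ done := fun hmem => hna ((pv_mem_ordStep _ _ _).mpr (Or.inr hmem))
    have hdc : d.contains a = false := by rw [hcont, hc]
    rw [if_pos (by rw [hdc]), if_neg (by simp)]
    rw [PySem.Dict.items_insert_of_not_contains d _ hdc, h, List.map_append]
    congr 1
    · apply List.map_congr_left
      intro x hx
      have hxa : x ≠ a := fun he => hna (he ▸ hx)
      simp [pvVal, hxa]
    · have hval : pvAval (fs ++ [p]) a = PySem.Set.ofList p.1 := by
        unfold pvAval
        rw [pv_listings_snoc, pv_listings_nil fs a hnord, if_pos (List.contains_iff_mem.mpr ha)]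
        rfl
      simp [pvVal, hval]
  · -- existing key: intersect in place
    have hmem : a ∈ pvOrdStep (pvOrd fs) done := List.contains_iff_mem.mp hc
    have hdc : d.contains a = true := by rw [hcont, hc]
    rw [if_neg (by rw [hdc]; simp), if_pos (by simp)]
    have hget : d.getD a [] = pvVal fs p done a := pv_dict_getD d _ _ h a hmem
    have hv : PySem.Set.inter (pvVal fs p done a) (PySem.Set.ofList p.1) = pvAval (fs ++ [p]) a := by
      unfold pvVal
      by_cases hd : a ∈ done
      · rw [if_pos (List.contains_iff_mem.mpr hd)]
        unfold pvAval
        rw [pv_listings_snoc, if_pos (List.contains_iff_mem.mpr ha), List.map_append]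
        exact pv_red_absorb _ _
      · rw [if_neg (by simp [List.contains_eq_mem, hd])]
        have hinord : a ∈ pvOrd fs := by
          rcases (pv_mem_ordStep _ _ _).mp hmem with h1 | h1
          · exact h1
          · exact absurd h1 hd
        unfold pvAval
        rw [pv_listings_snoc, if_pos (List.contains_iff_mem.mpr ha), List.map_append]
        have hne : (pvListings fs a).map (fun l => PySem.Set.ofList l) ≠ [] := by
          simpa using pv_listings_ne_nil fs a hinord
        exact (pv_red_snoc ((pvListings fs a).map (fun l => PySem.Set.ofList l))
          (PySem.Set.ofList p.1) hne).symm
    rw [PySem.Dict.items_insert_of_contains d _ hdc, h, List.map_map]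
    apply List.map_congr_left
    intro x hx
    simp only [Function.comp_def]
    by_cases hxa : x = a
    · subst hxa
      rw [if_pos (beq_self_eq_true x), hget, hv]
      simp [pvVal]
    · rw [if_neg (by simp [hxa])]
      simp [pvVal, hxa]

theorem pv_inner (fs : List (List String × List String)) (p : List String × List String) :
    ∀ (asl done : List String) (d : PySem.Dict String (List String)),
      (∀ x ∈ asl, x ∈ p.2) →
      d.items = (pvOrdStep (pvOrd fs) done).map (fun x => (x, pvVal fs p done x)) →
      (asl.foldl (fun (poss : PySem.Dict String (List String)) allerg =>
          if poss.contains allerg = false then poss.insert allerg (PySem.Set.ofList p.1)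
          else poss.insert allerg (PySem.Set.inter (poss.getD allerg []) (PySem.Set.ofList p.1))) d).items
        = (pvOrdStep (pvOrd fs) (done ++ asl)).map (fun x => (x, pvVal fs p (done ++ asl) x)) := by
  intro asl
  induction asl with
  | nil =>
    intro done d _ h
    simpa using h
  | cons a rest ih =>
    intro done d hsub h
    have hstep := pv_step fs p done a d (hsub a (by simp)) h
    have hrec := ih (done ++ [a]) _ (fun x hx => hsub x (by simp [hx])) hstep
    rw [List.foldl_cons, hrec, ← List.append_cons]

theorem pv_main (food : List (List String × List String)) :
    (food.foldl pvAstep PySem.Dict.empty).items = (pvOrd food).map (fun x => (x, pvAval food x)) := by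
  induction food using List.reverseRecOn with
  | nil => rfl
  | append_singleton fs p ih =>
    rw [List.foldl_append, List.foldl_cons, List.foldl_nil]
    have h0 : (fs.foldl pvAstep PySem.Dict.empty).items
        = (pvOrdStep (pvOrd fs) []).map (fun x => (x, pvVal fs p [] x)) := by
      rw [ih]
      apply List.map_congr_left
      intro x _
      simp [pvVal]
    have hin := pv_inner fs p p.2 [] _ (fun _ hx => hx) h0
    simp only [List.nil_append] at hin
    rw [show pvAstep (List.foldl pvAstep PySem.Dict.empty fs) p
          = p.2.foldl (fun (poss : PySem.Dict String (List String)) allerg =>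
              if poss.contains allerg = false then poss.insert allerg (PySem.Set.ofList p.1)
              else poss.insert allerg (PySem.Set.inter (poss.getD allerg []) (PySem.Set.ofList p.1)))
            (List.foldl pvAstep PySem.Dict.empty fs) from rfl]
    rw [hin, ← pv_ord_snoc]
    apply List.map_congr_left
    intro x _
    unfold pvVal
    split_ifs with h
    · rfl
    · rw [pv_aval_not_listed fs p x (by cases hc : p.2.contains x; rfl; exact absurd hc h)]

-- ===== VERDICT (by name: the statement is the Claim_ definition above) =====
theorem find_possible_allergens_spec : Claim_equal_find_possible_allergens := by
  intro food ingredients allergens _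
  unfold Spec_find_possible_allergens
  have hA : find_possible_allergens food ingredients allergens
      = (food.foldl pvAstep PySem.Dict.empty).items := rfl
  have hB : find_possible_allergens_alt food ingredients allergens
      = (pvOrd food).map (fun a => (a, pvBval food a)) := rfl
  rw [hA, hB, pv_main]
  apply List.map_congr_left
  intro a hmem
  rw [pv_aval_eq_bval food a (pv_listings_ne_nil food a hmem)]
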